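-- pv_equiv track=rewrite | github.com/luyaojie/E3C | src/metrics/event_coref_scores.py | split_cluster_with_different_label
-- ===== SOURCE A (Python) =====
-- from collections import Counter, OrderedDict, defaultdict
--
-- def split_cluster_with_different_label(clusters):
--     new_clusters = list()
--     for cluster in clusters:
--         new_label_cluster = defaultdict(list)
--         for mention in cluster:
--             assert len(mention) == 3
--             new_label_cluster[mention[2]] += [mention]
--         for label, new_cluster in new_label_cluster.items():
--             new_clusters += [tuple(new_cluster)]
--     return new_clusters
-- ===== SOURCE B (Python) =====
-- def split_cluster_with_different_label(clusters):
--     new_clusters = []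
--     for cluster in clusters:
--         seen = set()
--         labels = []
--         for mention in cluster:
--             assert len(mention) == 3
--             label = mention[2]
--             if label not in seen:
--                 seen.add(label)
--                 labels.append(label)
--         for label in labels:
--             new_clusters.append(tuple(m for m in cluster if m[2] == label))
--     return new_clusters
-- ===== Notes on version B (the rewrite author's own statement) =====
-- stated objective: alternative
-- what changed: Replaces the per-cluster defaultdict bucketing (one dict of growing lists, then emit its values) by dedup-then-filter: collect the distinct labels in first-appearance order with a seen-set, then one filter pass over the cluster per label.
import Mathlib
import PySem

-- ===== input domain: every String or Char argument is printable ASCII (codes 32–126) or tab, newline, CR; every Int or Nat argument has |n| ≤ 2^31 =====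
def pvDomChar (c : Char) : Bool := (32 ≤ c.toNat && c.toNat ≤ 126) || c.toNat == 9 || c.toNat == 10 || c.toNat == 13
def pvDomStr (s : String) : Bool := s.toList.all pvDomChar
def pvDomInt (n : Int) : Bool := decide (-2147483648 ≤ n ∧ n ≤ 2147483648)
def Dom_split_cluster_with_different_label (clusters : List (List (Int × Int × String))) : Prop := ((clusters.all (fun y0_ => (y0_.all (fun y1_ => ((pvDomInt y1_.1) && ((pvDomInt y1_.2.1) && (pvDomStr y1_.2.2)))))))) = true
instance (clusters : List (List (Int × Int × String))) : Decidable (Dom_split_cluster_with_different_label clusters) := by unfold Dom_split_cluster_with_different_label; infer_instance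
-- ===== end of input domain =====

-- B replaces A's per-cluster defaultdict bucketing by dedup-then-filter (distinct labels in first-appearance order, then one filter pass per label): an alternative decomposition, same results and same order.


-- ===== PORT A =====
-- Port of A: defaultdict(list) bucketing per cluster, then emit the dict's values in insertion order.
-- (the `assert len(mention) == 3` always holds: mentions are typed triples)
def split_cluster_with_different_label (clusters : List (List (Int × Int × String))) : List (List (Int × Int × String)) :=
  clusters.foldl (fun new_clusters cluster =>
    let d := cluster.foldl (fun d m => PySem.Dict.modify d m.2.2 [] (fun v => v ++ [m]))
               (PySem.Dict.empty : PySem.Dict String (List (Int × Int × String)))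
    d.items.foldl (fun nc p => nc ++ [p.2]) new_clusters) []

-- ===== PORT B =====
-- Port of B: seen-set dedup of the labels (a PySem.Set IS the distinct labels in
-- first-insertion order, i.e. the `seen`/`labels` pair of Source B), then one filter pass per label.
def split_cluster_with_different_label_alt (clusters : List (List (Int × Int × String))) : List (List (Int × Int × String)) :=
  clusters.foldl (fun new_clusters cluster =>
    let labels : PySem.Set String := cluster.foldl (fun s m => PySem.Set.add s m.2.2) PySem.Set.empty
    labels.foldl (fun nc lab => nc ++ [cluster.filter (fun m => m.2.2 == lab)]) new_clusters) []

-- ===== PRECONDITION & SPEC =====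
def Spec_split_cluster_with_different_label (clusters : List (List (Int × Int × String))) (out : List (List (Int × Int × String))) : Prop := out = split_cluster_with_different_label_alt clusters
instance (clusters : List (List (Int × Int × String))) (out : List (List (Int × Int × String))) : Decidable (Spec_split_cluster_with_different_label clusters out) := by unfold Spec_split_cluster_with_different_label; infer_instance

-- ===== CLAIM (what is proved, stated in full; the proofs are below) =====
def Claim_equal_split_cluster_with_different_label : Prop := ∀ (clusters : List (List (Int × Int × String))), Dom_split_cluster_with_different_label clusters → Spec_split_cluster_with_different_label clusters (split_cluster_with_different_label clusters)

-- ===== LEMMAS AND PROOFS =====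

-- The per-cluster dict's items are exactly (label, filter-by-label) over the deduped labels.
lemma getD_bucket (cluster : List (Int × Int × String)) (lab : String) :
    (cluster.foldl (fun d m => PySem.Dict.modify d m.2.2 [] (fun v => v ++ [m]))
      (PySem.Dict.empty : PySem.Dict String (List (Int × Int × String)))).getD lab []
    = cluster.filter (fun m => m.2.2 == lab) := by
  have h := PySem.Dict.getD_foldl_modify_append
    (l := cluster.map (fun m => (m.2.2, m)))
    (d := (PySem.Dict.empty : PySem.Dict String (List (Int × Int × String)))) (c := lab)
  rw [List.foldl_map] at h
  simpa [List.filter_map, Function.comp_def] using h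

lemma keys_bucket (cluster : List (Int × Int × String)) :
    (cluster.foldl (fun d m => PySem.Dict.modify d m.2.2 [] (fun v => v ++ [m]))
      (PySem.Dict.empty : PySem.Dict String (List (Int × Int × String)))).keys
    = PySem.Set.ofList (cluster.map (fun m => m.2.2)) := by
  rw [PySem.Dict.keys_foldl_modify_key (key := fun (m : Int × Int × String) => m.2.2)
        (f := fun _ m => fun v => v ++ [m]) (d0 := [])]
  exact PySem.Set.update_nil_left _

lemma items_bucket (cluster : List (Int × Int × String)) :
    (cluster.foldl (fun d m => PySem.Dict.modify d m.2.2 [] (fun v => v ++ [m]))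
      (PySem.Dict.empty : PySem.Dict String (List (Int × Int × String)))).items
    = (PySem.Set.ofList (cluster.map (fun m => m.2.2))).map
        (fun lab => (lab, cluster.filter (fun m => m.2.2 == lab))) := by
  have hnd : (cluster.foldl (fun d m => PySem.Dict.modify d m.2.2 [] (fun v => v ++ [m]))
      (PySem.Dict.empty : PySem.Dict String (List (Int × Int × String)))).keys.Nodup := by
    apply PySem.Dict.nodup_keys_foldl_modify_key
    simp
  rw [PySem.Dict.items_eq_map_keys _ hnd [], keys_bucket]
  exact List.map_congr_left (fun lab _ => by rw [getD_bucket])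

lemma labels_eq (cluster : List (Int × Int × String)) :
    cluster.foldl (fun s m => PySem.Set.add s m.2.2) PySem.Set.empty
    = PySem.Set.ofList (cluster.map (fun m => m.2.2)) := by
  rw [← PySem.Set.update_map_eq_foldl_add, PySem.Set.update_empty]

lemma step_eq (nc : List (List (Int × Int × String))) (cluster : List (Int × Int × String)) :
    ((cluster.foldl (fun d m => PySem.Dict.modify d m.2.2 [] (fun v => v ++ [m]))
      (PySem.Dict.empty : PySem.Dict String (List (Int × Int × String)))).items).foldl
        (fun nc p => nc ++ [p.2]) nc
    = (cluster.foldl (fun s m => PySem.Set.add s m.2.2) PySem.Set.empty).foldl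
        (fun nc lab => nc ++ [cluster.filter (fun m => m.2.2 == lab)]) nc := by
  rw [items_bucket, labels_eq, List.foldl_map]

-- ===== VERDICT (by name: the statement is the Claim_ definition above) =====
theorem split_cluster_with_different_label_spec : Claim_equal_split_cluster_with_different_label := by
  intro clusters _
  unfold Spec_split_cluster_with_different_label split_cluster_with_different_label split_cluster_with_different_label_alt
  congr 1
  funext nc cluster
  exact step_eq nc cluster
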